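-- pv_equiv track=rewrite | github.com/Mishaaa057/leetcode | 02132022/l-2032.py | twoOutOfThree
-- ===== SOURCE A (Python) =====
-- def twoOutOfThree(nums1: list, nums2: list, nums3: list) -> list:
--     nums_set = [nums1, nums2, nums3]
--
--     dct = {}
--
--     for nums in nums_set:
--         nums = list(dict.fromkeys(nums))
--         for el in nums:
--             if el not in dct:
--                 dct[el] = 1
--             else:
--                 dct[el] += 1
--
--     result = []
--
--     for key in dct:
--         if dct[key] >= 2:
--             result.append(key)
--
--     return result
-- ===== SOURCE B (Python) =====
-- def twoOutOfThree(nums1: list, nums2: list, nums3: list) -> list: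
--     s1, s2, s3 = set(nums1), set(nums2), set(nums3)
--     seen = set()
--     result = []
--     for e in nums1 + nums2 + nums3:
--         if e in seen:
--             continue
--         seen.add(e)
--         if (e in s1) + (e in s2) + (e in s3) >= 2:
--             result.append(e)
--     return result
-- ===== Notes on version B (the rewrite author's own statement) =====
-- stated objective: idiomatic
-- what changed: Replaces A's per-list dedup plus increment-dict plus second pass over dict keys by three membership sets built up front and one pass over the concatenation with a seen-set, appending an element on first sight iff it occurs in at least two of the sets.
import Mathlib
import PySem

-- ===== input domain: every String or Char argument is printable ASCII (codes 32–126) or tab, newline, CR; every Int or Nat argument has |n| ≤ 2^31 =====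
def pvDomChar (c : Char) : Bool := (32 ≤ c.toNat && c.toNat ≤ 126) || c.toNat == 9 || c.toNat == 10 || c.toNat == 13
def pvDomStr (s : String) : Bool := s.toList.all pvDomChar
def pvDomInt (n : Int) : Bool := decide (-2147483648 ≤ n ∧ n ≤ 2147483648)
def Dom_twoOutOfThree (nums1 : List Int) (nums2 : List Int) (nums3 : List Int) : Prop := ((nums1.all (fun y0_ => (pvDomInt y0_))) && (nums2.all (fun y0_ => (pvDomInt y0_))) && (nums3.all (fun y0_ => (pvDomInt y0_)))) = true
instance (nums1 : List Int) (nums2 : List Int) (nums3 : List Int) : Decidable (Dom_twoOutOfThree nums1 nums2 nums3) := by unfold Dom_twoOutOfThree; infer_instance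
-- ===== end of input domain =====

-- B replaces A's per-list dedup + increment-dict + second pass over the dict's keys by three
-- membership sets built up front and one seen-set pass over the concatenation (idiomatic, same cost).

-- ===== PORT A =====
def twoOutOfThree (nums1 : List Int) (nums2 : List Int) (nums3 : List Int) : List Int :=
  let nums_set : List (List Int) := [nums1, nums2, nums3]
  let dct : PySem.Dict Int Int :=
    nums_set.foldl (fun dct nums =>
      (PySem.List.dedup nums).foldl (fun dct el =>
        if dct.contains el = false then dct.insert el 1
        else dct.insert el (dct.getD el 0 + 1)) dct) PySem.Dict.empty
  dct.keys.foldl (fun result key =>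
    if dct.getD key 0 ≥ 2 then result ++ [key] else result) []

-- ===== PORT B =====
def twoOutOfThree_alt (nums1 : List Int) (nums2 : List Int) (nums3 : List Int) : List Int :=
  let s1 : PySem.Set Int := PySem.Set.ofList nums1
  let s2 : PySem.Set Int := PySem.Set.ofList nums2
  let s3 : PySem.Set Int := PySem.Set.ofList nums3
  (((nums1 ++ nums2 ++ nums3).foldl (fun (st : PySem.Set Int × List Int) e =>
      if st.1.contains e then st
      else (PySem.Set.add st.1 e,
            if ((if s1.contains e then (1 : Int) else 0) + (if s2.contains e then 1 else 0)
                + (if s3.contains e then 1 else 0)) ≥ 2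
            then st.2 ++ [e] else st.2))
    (PySem.Set.empty, []))).2

-- ===== PRECONDITION & SPEC =====
def Spec_twoOutOfThree (nums1 : List Int) (nums2 : List Int) (nums3 : List Int) (out : List Int) : Prop := out = twoOutOfThree_alt nums1 nums2 nums3
instance (nums1 : List Int) (nums2 : List Int) (nums3 : List Int) (out : List Int) : Decidable (Spec_twoOutOfThree nums1 nums2 nums3 out) := by unfold Spec_twoOutOfThree; infer_instance

-- ===== CLAIM (what is proved, stated in full; the proofs are below) =====
def Claim_equal_twoOutOfThree : Prop := ∀ (nums1 : List Int) (nums2 : List Int) (nums3 : List Int), Dom_twoOutOfThree nums1 nums2 nums3 → Spec_twoOutOfThree nums1 nums2 nums3 (twoOutOfThree nums1 nums2 nums3)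

-- ===== LEMMAS AND PROOFS =====

theorem pvAdd_mem (s : PySem.Set Int) (e : Int) (h : PySem.Set.contains s e = true) :
    PySem.Set.add s e = s := by
  have h' : e ∈ s := by simpa [PySem.Set.contains, List.contains_eq_mem] using h
  simp [PySem.Set.add, h']

theorem pvAdd_not (s : PySem.Set Int) (e : Int) (h : PySem.Set.contains s e = false) :
    PySem.Set.add s e = s ++ [e] := by
  have h' : e ∉ s := by simpa [PySem.Set.contains, List.contains_eq_mem] using h
  simp [PySem.Set.add, h']

/-- The first occurrences, in order, of elements of the list not already in `s`. -/
def pvNew (s : List Int) : List Int → List Int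
  | [] => []
  | e :: t => if PySem.Set.contains s e then pvNew s t else e :: pvNew (s ++ [e]) t

theorem pvNew_update (l : List Int) : ∀ s : List Int, PySem.Set.update s l = s ++ pvNew s l := by
  induction l with
  | nil => intro s; simp [PySem.Set.update, pvNew]
  | cons e t ih =>
    intro s
    have hstep : PySem.Set.update s (e :: t) = PySem.Set.update (PySem.Set.add s e) t := rfl
    cases hc : PySem.Set.contains s e with
    | true =>
      rw [hstep, pvAdd_mem s e hc]
      simp only [pvNew, hc, if_true]
      exact ih s
    | false =>
      rw [hstep, pvAdd_not s e hc, ih (s ++ [e])]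
      have h' : e ∉ s := by simpa [PySem.Set.contains, List.contains_eq_mem] using hc
      simp [pvNew, h']

theorem pvNew_eq_dedup (l : List Int) : pvNew [] l = PySem.List.dedup l := by
  have h := pvNew_update l []
  rw [PySem.Set.update_nil_left] at h
  rw [PySem.List.dedup_eq_ofList]
  simpa using h.symm

theorem pvUpdate_pvNew (l : List Int) : ∀ s t : List Int,
    (∀ e : Int, PySem.Set.contains t e = true → PySem.Set.contains s e = true) →
    PySem.Set.update s (pvNew t l) = PySem.Set.update s l := by
  induction l with
  | nil => intro s t _; rfl
  | cons e l ih =>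
    intro s t hst
    have hstep : PySem.Set.update s (e :: l) = PySem.Set.update (PySem.Set.add s e) l := rfl
    cases hc : PySem.Set.contains t e with
    | true =>
      have hs : PySem.Set.contains s e = true := hst e hc
      simp only [pvNew, hc, if_true]
      rw [hstep, pvAdd_mem s e hs]
      exact ih s t hst
    | false =>
      simp only [pvNew, hc, Bool.false_eq_true, if_false]
      have hstep2 : PySem.Set.update s (e :: pvNew (t ++ [e]) l)
          = PySem.Set.update (PySem.Set.add s e) (pvNew (t ++ [e]) l) := rfl
      rw [hstep, hstep2]
      apply ih
      intro e' he'
      simp only [PySem.Set.contains, List.contains_eq_mem, List.mem_append,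
        List.mem_singleton, decide_eq_true_eq] at he' ⊢
      cases hc2 : PySem.Set.contains s e with
      | true =>
        rw [pvAdd_mem s e hc2]
        rcases he' with h1 | h1
        · have := hst e' (by simpa [PySem.Set.contains, List.contains_eq_mem] using h1)
          simpa [PySem.Set.contains, List.contains_eq_mem] using this
        · subst h1
          simpa [PySem.Set.contains, List.contains_eq_mem] using hc2
      | false =>
        rw [pvAdd_not s e hc2]
        simp only [List.mem_append, List.mem_singleton]
        rcases he' with h1 | h1
        · exact Or.inl (by
            have := hst e' (by simpa [PySem.Set.contains, List.contains_eq_mem] using h1)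
            simpa [PySem.Set.contains, List.contains_eq_mem] using this)
        · exact Or.inr h1

theorem pvUpdate_dedup (x : List Int) (s : List Int) :
    PySem.Set.update s (PySem.List.dedup x) = PySem.Set.update s x := by
  rw [← pvNew_eq_dedup]
  exact pvUpdate_pvNew x s [] (by intro e h; simp [PySem.Set.contains] at h)

theorem pvOfList_eq (n1 n2 n3 : List Int) :
    PySem.Set.ofList (PySem.List.dedup n1 ++ (PySem.List.dedup n2 ++ PySem.List.dedup n3))
      = PySem.Set.ofList (n1 ++ n2 ++ n3) := by
  rw [← PySem.Set.update_nil_left, ← PySem.Set.update_nil_left]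
  simp only [PySem.Set.update, List.foldl_append]
  have h1 : List.foldl PySem.Set.add [] (PySem.List.dedup n1) = List.foldl PySem.Set.add [] n1 :=
    pvUpdate_dedup n1 []
  rw [h1]
  have h2 := pvUpdate_dedup n2 (List.foldl PySem.Set.add [] n1)
  simp only [PySem.Set.update] at h2
  rw [h2]
  have h3 := pvUpdate_dedup n3 (List.foldl PySem.Set.add (List.foldl PySem.Set.add [] n1) n2)
  simp only [PySem.Set.update] at h3
  rw [h3]

/-- B's fold, generalized over the membership-count predicate. -/
theorem pvFoldB (P : Int → Prop) [DecidablePred P] (l : List Int) :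
    ∀ (s : PySem.Set Int) (r : List Int),
    (l.foldl (fun (st : PySem.Set Int × List Int) e =>
        if st.1.contains e then st
        else (PySem.Set.add st.1 e, if P e then st.2 ++ [e] else st.2)) (s, r)).2
      = r ++ (pvNew s l).filter (fun e => decide (P e)) := by
  induction l with
  | nil => intro s r; simp [pvNew]
  | cons e t ih =>
    intro s r
    cases hc : PySem.Set.contains s e with
    | true =>
      simp only [List.foldl_cons, hc, if_true, pvNew]
      exact ih s r
    | false =>
      simp only [List.foldl_cons, hc, Bool.false_eq_true, if_false, pvNew,
        pvAdd_not s e hc, ih (s ++ [e])]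
      by_cases hp : P e <;> simp [hp]

theorem pvCountDedup (x : List Int) (e : Int) :
    List.count e (PySem.List.dedup x) = if e ∈ x then 1 else 0 := by
  by_cases h : e ∈ x
  · rw [if_pos h]
    exact List.count_eq_one_of_mem (PySem.List.nodup_dedup x) ((PySem.List.mem_dedup x e).2 h)
  · rw [if_neg h]
    exact List.count_eq_zero.2 (fun hc => h ((PySem.List.mem_dedup x e).1 hc))

theorem pvContains_ofList (x : List Int) (e : Int) :
    PySem.Set.contains (PySem.Set.ofList x) e = decide (e ∈ x) := by
  by_cases h : e ∈ x
  · have hm : e ∈ PySem.Set.ofList x := (PySem.Set.mem_ofList x e).2 h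
    simp [PySem.Set.contains, List.contains_eq_mem, hm, h]
  · have hm : e ∉ PySem.Set.ofList x := fun hc => h ((PySem.Set.mem_ofList x e).1 hc)
    simp [PySem.Set.contains, List.contains_eq_mem, hm, h]

theorem pvInnerFun :
    (fun (dct : PySem.Dict Int Int) el =>
        if dct.contains el = false then dct.insert el 1
        else dct.insert el (dct.getD el 0 + 1))
      = fun (dct : PySem.Dict Int Int) el => dct.insert el (dct.getD el 0 + 1) := by
  funext d el
  cases hc : d.contains el with
  | false =>
    have hn : d.get? el = none := by
      have h := PySem.Dict.contains_eq_isSome_get? d el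
      rw [hc] at h
      exact Option.not_isSome_iff_eq_none.1 (by simp [← h])
    simp [PySem.Dict.getD, hn]
  | true => simp

theorem pvOutFilter (d : PySem.Dict Int Int) :
    d.keys.foldl (fun result key => if d.getD key 0 ≥ 2 then result ++ [key] else result) []
      = d.keys.filter (fun k => decide (d.getD k 0 ≥ 2)) := by
  have hf : (fun (result : List Int) key =>
      if d.getD key 0 ≥ 2 then result ++ [key] else result)
      = fun result key =>
        if (fun k => decide (d.getD k 0 ≥ 2)) key = true
        then result ++ [(fun (y : Int) => y) key] else result := by
    funext r k; simp
  rw [hf, PySem.List.foldl_append_if]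
  simp

-- ===== VERDICT (by name: the statement is the Claim_ definition above) =====
theorem twoOutOfThree_spec : Claim_equal_twoOutOfThree := by
  intro n1 n2 n3 _
  unfold Spec_twoOutOfThree twoOutOfThree twoOutOfThree_alt
  simp only [List.foldl_cons, List.foldl_nil, pvInnerFun]
  rw [← List.foldl_append, ← List.foldl_append,
    PySem.Dict.foldl_insert_getD_add_one_eq_counter, pvOutFilter]
  -- B's result loop as a filter over the deduped concatenation
  rw [pvFoldB (fun e => ((if PySem.Set.contains (PySem.Set.ofList n1) e then (1 : Int) else 0)
      + (if PySem.Set.contains (PySem.Set.ofList n2) e then 1 else 0)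
      + (if PySem.Set.contains (PySem.Set.ofList n3) e then 1 else 0)) ≥ 2)
      (n1 ++ n2 ++ n3) PySem.Set.empty []]
  have hempty : (PySem.Set.empty : PySem.Set Int) = ([] : List Int) := rfl
  have hsets : PySem.Set.ofList (PySem.List.dedup n1 ++ (PySem.List.dedup n2 ++ PySem.List.dedup n3))
      = PySem.List.dedup (n1 ++ n2 ++ n3) := by
    rw [pvOfList_eq, PySem.List.dedup_eq_ofList]
  rw [hempty, pvNew_eq_dedup, List.nil_append, PySem.Dict.keys_counter, hsets]
  apply List.filter_congr
  intro k _
  rw [PySem.Dict.getD_counter]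
  have hcount : List.count k (PySem.List.dedup n1 ++ (PySem.List.dedup n2 ++ PySem.List.dedup n3))
      = (if k ∈ n1 then 1 else 0) + (if k ∈ n2 then 1 else 0) + (if k ∈ n3 then 1 else 0) := by
    simp only [List.count_append, pvCountDedup]
    ring
  rw [hcount, pvContains_ofList, pvContains_ofList, pvContains_ofList]
  by_cases h1 : k ∈ n1 <;> by_cases h2 : k ∈ n2 <;> by_cases h3 : k ∈ n3 <;>
    simp [h1, h2, h3]
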